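-- pv_equiv track=rewrite | github.com/soerenkoehler/python-scripts | puzzles/lucid-dreams-puzzle.py | all_steps
-- ===== SOURCE A (Python) =====
-- def all_steps(state):
--     result = list()
--     for action in range(len(state[0])):
--         if state[0][action] != 0:
--             next_state = jump(state, action, 1) or jump(state, action, 2)
--             if next_state:
--                 result = result + all_steps(next_state)
--             else:
--                 result = result + [state]
--     return result
--
-- def jump(state, action, distance):
--     destination = distance * state[0][action] + action
--     if destination < 0 or destination >= len(state[0]):
--         return None
--     if state[0][destination] != 0:
--         return None
--     result = list(state[0])
--     result[destination] = result[action]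
--     result[action] = 0
--     return result, [action] + state[1]
-- ===== SOURCE B (Python) =====
-- def jump(state, action, distance):
--     destination = distance * state[0][action] + action
--     if destination < 0 or destination >= len(state[0]):
--         return None
--     if state[0][destination] != 0:
--         return None
--     result = list(state[0])
--     result[destination] = result[action]
--     result[action] = 0
--     return result, [action] + state[1]
--
-- def all_steps(state):
--     result = []
--     stack = [("expand", state)]
--     while stack:
--         kind, s = stack.pop()
--         if kind == "emit":
--             result.append(s)
--         else:
--             children = []
--             for action in range(len(s[0])):
--                 if s[0][action] != 0:
--                     next_state = jump(s, action, 1) or jump(s, action, 2)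
--                     if next_state:
--                         children.append(("expand", next_state))
--                     else:
--                         children.append(("emit", s))
--             stack.extend(reversed(children))
--     return result
-- ===== Notes on version B (the rewrite author's own statement) =====
-- stated objective: alternative
-- what changed: Replaces A's recursive depth-first expansion (with quadratic list concatenation) by an iterative loop over an explicit stack of expand/emit tasks, pushed in reverse so the pre-order output is reproduced exactly; the module helper jump is kept unchanged.
import Mathlib
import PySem

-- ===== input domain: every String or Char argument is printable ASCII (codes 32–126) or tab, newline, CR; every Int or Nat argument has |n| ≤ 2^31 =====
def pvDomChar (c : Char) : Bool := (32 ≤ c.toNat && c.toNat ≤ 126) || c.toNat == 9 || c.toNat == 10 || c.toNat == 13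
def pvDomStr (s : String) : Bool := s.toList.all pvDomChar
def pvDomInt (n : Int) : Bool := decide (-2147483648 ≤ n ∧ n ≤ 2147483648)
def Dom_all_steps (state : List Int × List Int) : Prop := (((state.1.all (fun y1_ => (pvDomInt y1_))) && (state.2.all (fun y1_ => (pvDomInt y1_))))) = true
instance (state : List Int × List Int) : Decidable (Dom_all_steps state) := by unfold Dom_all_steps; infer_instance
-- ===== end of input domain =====

-- B rewrites the recursive search as an iterative loop over an explicit stack of
-- expand/emit tasks; return value only, same output in the same order.

-- ===== PORT A =====
-- shared module helper `jump` (used by both Pythons unchanged).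
-- All list indices reached here are in range (action ∈ range(len), destination
-- bounds-checked first), so `getD _ 0` is exact for Python's indexing.
def jump (state : List Int × List Int) (action : Nat) (distance : Int) : Option (List Int × List Int) :=
  let destination : Int := distance * state.1.getD action 0 + (action : Int)
  if destination < 0 ∨ (state.1.length : Int) ≤ destination then none
  else if state.1.getD destination.toNat 0 ≠ 0 then none
  else
    let result := state.1.set destination.toNat (state.1.getD action 0)
    let result := result.set action 0
    some (result, (action : Int) :: state.2)

-- fuel guard for totality: the Python recursion terminates because each jump
-- strictly decreases a measure bounded by len², so len²+1 levels always suffice.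
def pvFuel (state : List Int × List Int) : Nat := state.1.length * state.1.length + 1

mutual
-- literal transliteration of A's recursion, with a fuel totality guard
def allStepsA : Nat → (List Int × List Int) → List (List Int × List Int)
  | 0, _ => []   -- fuel guard, never reached from `all_steps`
  | fuel+1, state => allStepsGo fuel state (List.range state.1.length) []
termination_by fuel _ => (fuel, 0)

-- A's `for action in range(len(state[0]))` loop over accumulator `result`
def allStepsGo : Nat → (List Int × List Int) → List Nat → List (List Int × List Int) → List (List Int × List Int)
  | _, _, [], result => result
  | fuel, state, action :: rest, result =>
    if state.1.getD action 0 ≠ 0 then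
      match (jump state action 1).orElse (fun _ => jump state action 2) with
      | some next_state => allStepsGo fuel state rest (result ++ allStepsA fuel next_state)
      | none => allStepsGo fuel state rest (result ++ [state])
    else allStepsGo fuel state rest result
termination_by fuel _ actions _ => (fuel, actions.length + 1)
end

def all_steps (state : List Int × List Int) : List (List Int × List Int) :=
  allStepsA (pvFuel state) state

-- ===== PORT B =====
-- a stack entry ("expand", s) / ("emit", s); expand tasks carry the fuel guard
inductive PvTask where
  | expand : Nat → (List Int × List Int) → PvTask
  | emit : (List Int × List Int) → PvTask

-- B's inner `for action in range(len(s[0]))` loop building the children list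
def childTasks (f : Nat) (state : List Int × List Int) : List Nat → List PvTask
  | [] => []
  | action :: rest =>
    if state.1.getD action 0 ≠ 0 then
      (match (jump state action 1).orElse (fun _ => jump state action 2) with
        | some next_state => PvTask.expand f next_state
        | none => PvTask.emit state) :: childTasks f state rest
    else childTasks f state rest

-- B's `while stack:` loop; head of the list is the top of the stack, so
-- prepending the children equals Python's `stack.extend(reversed(children))`.
-- The outer Nat is a fuel guard making the while-loop structural.
def loopB : Nat → List PvTask → List (List Int × List Int) → List (List Int × List Int)
  | _, [], result => result
  | 0, _ :: _, result => result   -- fuel guard, never reached from `all_steps_alt`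
  | g+1, PvTask.emit s :: rest, result => loopB g rest (result ++ [s])
  | g+1, PvTask.expand 0 _ :: rest, result => loopB g rest result   -- fuel guard
  | g+1, PvTask.expand (f+1) s :: rest, result =>
      loopB g (childTasks f s (List.range s.1.length) ++ rest) result

def all_steps_alt (state : List Int × List Int) : List (List Int × List Int) :=
  loopB ((state.1.length + 1) ^ (pvFuel state + 1)) [PvTask.expand (pvFuel state) state] []

-- ===== PRECONDITION & SPEC =====
def Spec_all_steps (state : List Int × List Int) (out : List (List Int × List Int)) : Prop := out = all_steps_alt state
instance (state : List Int × List Int) (out : List (List Int × List Int)) : Decidable (Spec_all_steps state out) := by unfold Spec_all_steps; infer_instance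

-- ===== CLAIM (what is proved, stated in full; the proofs are below) =====
def Claim_equal_all_steps : Prop := ∀ (state : List Int × List Int), Dom_all_steps state → Spec_all_steps state (all_steps state)

-- ===== LEMMAS AND PROOFS =====

-- the list a task contributes to the final result
def evalTask : PvTask → List (List Int × List Int)
  | .emit s => [s]
  | .expand f s => allStepsA f s

-- weight bounding the number of loop iterations a task can generate
def wTask : PvTask → Nat
  | .emit _ => 1
  | .expand f s => (s.1.length + 1) ^ (f + 1)

def wStack (ts : List PvTask) : Nat := (ts.map wTask).sum

theorem jump_length {s : List Int × List Int} {a : Nat} {d : Int} {ns : List Int × List Int}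
    (h : jump s a d = some ns) : ns.1.length = s.1.length := by
  unfold jump at h
  dsimp only at h
  split at h
  · cases h
  · split at h
    · cases h
    · cases h; simp

theorem orElse_jump_length {s : List Int × List Int} {a : Nat} {ns : List Int × List Int}
    (h : (jump s a 1).orElse (fun _ => jump s a 2) = some ns) : ns.1.length = s.1.length := by
  cases h1 : jump s a 1 with
  | some v =>
    rw [h1] at h; simp only [Option.orElse] at h; cases h; exact jump_length h1
  | none =>
    rw [h1] at h; simp only [Option.orElse] at h; exact jump_length h

theorem one_le_wTask (t : PvTask) : 1 ≤ wTask t := by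
  cases t with
  | emit s => simp [wTask]
  | expand f s => exact Nat.one_le_pow _ _ (by omega)

theorem wStack_append (a b : List PvTask) : wStack (a ++ b) = wStack a + wStack b := by
  simp [wStack]

theorem wStack_children (f : Nat) (s : List Int × List Int) (actions : List Nat) :
    wStack (childTasks f s actions) ≤ actions.length * (s.1.length + 1) ^ (f + 1) := by
  induction actions with
  | nil => simp [childTasks, wStack]
  | cons a rest ih =>
    simp only [childTasks]
    split_ifs with h
    · cases hj : (jump s a 1).orElse (fun _ => jump s a 2) with
      | some ns =>
        simp only [wStack, List.map_cons, List.sum_cons, wTask]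
        rw [orElse_jump_length hj]
        have ih' : (List.map wTask (childTasks f s rest)).sum
            ≤ rest.length * (s.1.length + 1) ^ (f + 1) := ih
        calc (s.1.length + 1) ^ (f + 1) + (List.map wTask (childTasks f s rest)).sum
            ≤ (s.1.length + 1) ^ (f + 1) + rest.length * (s.1.length + 1) ^ (f + 1) :=
              Nat.add_le_add_left ih' _
          _ = (a :: rest).length * (s.1.length + 1) ^ (f + 1) := by simp; ring
      | none =>
        simp only [wStack, List.map_cons, List.sum_cons, wTask]
        have hp : 1 ≤ (s.1.length + 1) ^ (f + 1) := Nat.one_le_pow _ _ (by omega)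
        have ih' : (List.map wTask (childTasks f s rest)).sum
            ≤ rest.length * (s.1.length + 1) ^ (f + 1) := ih
        calc 1 + (List.map wTask (childTasks f s rest)).sum
            ≤ (s.1.length + 1) ^ (f + 1) + rest.length * (s.1.length + 1) ^ (f + 1) :=
              Nat.add_le_add hp ih'
          _ = (a :: rest).length * (s.1.length + 1) ^ (f + 1) := by simp; ring
    · calc wStack (childTasks f s rest) ≤ rest.length * (s.1.length + 1) ^ (f + 1) := ih
        _ ≤ (a :: rest).length * (s.1.length + 1) ^ (f + 1) := by
            apply Nat.mul_le_mul_right; simp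

-- A's loop body produces exactly the concatenation of its child tasks' results
theorem allStepsGo_eq_flatMap (f : Nat) (s : List Int × List Int) (actions : List Nat) :
    ∀ result, allStepsGo f s actions result = result ++ (childTasks f s actions).flatMap evalTask := by
  induction actions with
  | nil => intro result; simp [allStepsGo, childTasks]
  | cons a rest ih =>
    intro result
    simp only [allStepsGo, childTasks]
    split_ifs with h
    · cases hj : (jump s a 1).orElse (fun _ => jump s a 2) with
      | some ns => simp [ih, evalTask]
      | none => simp [ih, evalTask]
    · simp [ih]

-- the stack machine, given enough gas, computes the concatenation of its tasks
theorem loopB_eq (g : Nat) : ∀ (stack : List PvTask) (result : List (List Int × List Int)),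
    wStack stack ≤ g → loopB g stack result = result ++ stack.flatMap evalTask := by
  induction g with
  | zero =>
    intro stack result h
    cases stack with
    | nil => simp [loopB]
    | cons t rest =>
      exfalso
      have h1 := one_le_wTask t
      have : wStack (t :: rest) = wTask t + wStack rest := by simp [wStack]
      omega
  | succ g ih =>
    intro stack result h
    cases stack with
    | nil => simp [loopB]
    | cons t rest =>
      have hsplit : wStack (t :: rest) = wTask t + wStack rest := by simp [wStack]
      cases t with
      | emit s =>
        have : wStack rest ≤ g := by simp [wTask] at hsplit; omega
        simp [loopB, ih rest (result ++ [s]) this, evalTask]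
      | expand f s =>
        cases f with
        | zero =>
          have hw : wTask (PvTask.expand 0 s) = (s.1.length + 1) ^ 1 := rfl
          have hp : 1 ≤ (s.1.length + 1) ^ 1 := Nat.one_le_pow _ _ (by omega)
          have : wStack rest ≤ g := by rw [hw] at hsplit; omega
          simp [loopB, ih rest result this, evalTask, allStepsA]
        | succ f =>
          have hc := wStack_children f s (List.range s.1.length)
          rw [List.length_range] at hc
          have hw : wTask (PvTask.expand (f+1) s)
              = s.1.length * (s.1.length + 1) ^ (f + 1) + (s.1.length + 1) ^ (f + 1) := by
            simp only [wTask]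
            calc (s.1.length + 1) ^ (f + 1 + 1)
                = (s.1.length + 1) * (s.1.length + 1) ^ (f + 1) := by ring
              _ = s.1.length * (s.1.length + 1) ^ (f + 1) + (s.1.length + 1) ^ (f + 1) := by ring
          have hp : 1 ≤ (s.1.length + 1) ^ (f + 1) := Nat.one_le_pow _ _ (by omega)
          have hle : wStack (childTasks f s (List.range s.1.length) ++ rest) ≤ g := by
            rw [wStack_append]; rw [hw] at hsplit; omega
          simp only [loopB]
          rw [ih _ result hle, List.flatMap_append]
          simp only [List.flatMap_cons, evalTask, allStepsA,
            allStepsGo_eq_flatMap f s (List.range s.1.length) [], List.nil_append]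

-- ===== VERDICT (by name: the statement is the Claim_ definition above) =====
theorem all_steps_spec : Claim_equal_all_steps := by
  intro state _
  show all_steps state = all_steps_alt state
  unfold all_steps all_steps_alt
  rw [loopB_eq _ _ _ (by simp [wStack, wTask])]
  simp [evalTask]
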